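-- pv_equiv track=rewrite | github.com/chenxin-hdu/HetFL | defects4j/method_call.py | decode_param_type
-- ===== SOURCE A (Python) =====
-- def decode_param_type(param: str):
--     result = ""
--     while param.endswith("[]"):
--         result += "["
--         param = param[:-2]
--     param = param.split(".")[-1]
--     result += param
--     return result
-- ===== SOURCE B (Python) =====
-- def decode_param_type(param: str):
--     n = len(param)
--     i = n
--     while i >= 2 and param[i - 2] == "[" and param[i - 1] == "]":
--         i -= 2
--     seg = ""
--     for c in param[:i]:
--         seg = "" if c == "." else seg + c
--     return "[" * ((n - i) // 2) + seg
-- ===== Notes on version B (the rewrite author's own statement) =====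
-- stated objective: alternative
-- what changed: Replaces A's loop that rebuilds the string by slicing off '[]' two chars at a time plus split('.')[-1] with index arithmetic (a backward index scan to find where the bracket suffix starts) and a single forward character pass that resets the accumulated segment at each '.'.
import Mathlib
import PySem

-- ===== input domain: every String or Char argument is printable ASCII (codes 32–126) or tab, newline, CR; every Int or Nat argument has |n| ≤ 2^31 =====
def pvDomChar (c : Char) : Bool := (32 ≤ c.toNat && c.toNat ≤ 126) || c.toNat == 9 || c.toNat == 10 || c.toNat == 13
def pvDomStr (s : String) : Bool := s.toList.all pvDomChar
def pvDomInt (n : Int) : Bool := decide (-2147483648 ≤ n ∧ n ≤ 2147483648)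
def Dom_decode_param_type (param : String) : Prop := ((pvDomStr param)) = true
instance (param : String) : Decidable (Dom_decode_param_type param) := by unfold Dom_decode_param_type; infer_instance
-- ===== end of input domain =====

-- B replaces A's repeated "[]"-stripping with index arithmetic (no string rebuilding) and the
-- split('.')[-1] with one forward pass; objective: alternative decomposition of the same task.

-- ===== PORT A =====
-- while param.endswith("[]"): result += "["; param = param[:-2]
def aLoop (result : List Char) (param : List Char) : List Char × List Char :=
  if h : PySem.Chars.endswith param ['[', ']'] = true then
    aLoop (result ++ ['[']) (PySem.List.slice param none (some (-2)))
  else (result, param)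
termination_by param.length
decreasing_by
  have h2 : 2 ≤ param.length := by
    have := (PySem.Chars.endswith_iff param ['[', ']']).mp h
    simpa using this.length_le
  rw [PySem.List.slice_to_neg_ofNat param 2 (by omega)]
  simp only [List.length_take]
  omega

def decode_param_type (param : String) : String :=
  let rp := aLoop [] param.toList
  -- param = param.split(".")[-1]  (split on nonempty sep always returns a nonempty list,
  -- so the [-1] indexing never fails; .getD [] is for totality only)
  let p2 := (PySem.List.pyGet? ((PySem.Chars.split? rp.2 ['.']).getD []) (-1)).getD []
  String.ofList (rp.1 ++ p2)

-- ===== PORT B =====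
-- while i >= 2 and param[i-2] == "[" and param[i-1] == "]": i -= 2
def bStrip (cs : List Char) (i : Nat) : Nat :=
  if h : 2 ≤ i ∧ PySem.List.pyGet? cs ((i : Int) - 2) = some '['
           ∧ PySem.List.pyGet? cs ((i : Int) - 1) = some ']' then
    bStrip cs (i - 2)
  else i
termination_by i
decreasing_by omega

-- for c in param[:i]: seg = "" if c == "." else seg + c
def bSeg (seg : List Char) : List Char → List Char
  | [] => seg
  | c :: rest => bSeg (if c = '.' then [] else seg ++ [c]) rest

def decode_param_type_alt (param : String) : String :=
  let cs := param.toList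
  let n := cs.length
  let i := bStrip cs n
  let seg := bSeg [] (PySem.List.slice cs none (some (i : Int)))
  String.ofList (PySem.List.pyRepeat ['['] (PySem.Int.floordiv ((n : Int) - (i : Int)) 2) ++ seg)

-- ===== PRECONDITION & SPEC =====
def Spec_decode_param_type (param : String) (out : String) : Prop := out = decode_param_type_alt param
instance (param : String) (out : String) : Decidable (Spec_decode_param_type param out) := by unfold Spec_decode_param_type; infer_instance

-- ===== CLAIM (what is proved, stated in full; the proofs are below) =====
def Claim_equal_decode_param_type : Prop := ∀ (param : String), Dom_decode_param_type param → Spec_decode_param_type param (decode_param_type param)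

-- ===== LEMMAS AND PROOFS =====

theorem bStrip_le (cs : List Char) (i : Nat) : bStrip cs i ≤ i := by
  fun_induction bStrip cs i with
  | case1 i h ih => omega
  | case2 i h => omega

theorem bStrip_even (cs : List Char) (i : Nat) : 2 ∣ (i - bStrip cs i) := by
  fun_induction bStrip cs i with
  | case1 i h ih =>
    have hle := bStrip_le cs (i - 2)
    omega
  | case2 i h => omega

-- the loop guard of A, on cs.take i, is exactly the loop guard of B at index i
theorem endswith_take_iff (cs : List Char) (i : Nat) (hi : i ≤ cs.length) :
    PySem.Chars.endswith (cs.take i) ['[', ']'] = true ↔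
      (2 ≤ i ∧ PySem.List.pyGet? cs ((i : Int) - 2) = some '['
             ∧ PySem.List.pyGet? cs ((i : Int) - 1) = some ']') := by
  rw [PySem.Chars.endswith_iff, List.suffix_iff_eq_drop]
  have hlt : (cs.take i).length = i := by simp; omega
  constructor
  · intro h
    have hlen : 2 ≤ i := by
      by_contra hcon
      have := congrArg List.length h
      simp at this
      omega
    have h2 : (i : Int) - 2 = ((i - 2 : Nat) : Int) := by omega
    have h1 : (i : Int) - 1 = ((i - 1 : Nat) : Int) := by omega
    rw [h2, h1, PySem.List.pyGet?_natCast, PySem.List.pyGet?_natCast]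
    rw [hlt] at h
    refine ⟨hlen, ?_, ?_⟩
    · have e0 := congrArg (fun l => l[0]?) h.symm
      simpa [List.getElem?_drop, List.getElem?_take, show i - 2 < i by omega] using e0
    · have e1 := congrArg (fun l => l[1]?) h.symm
      simp only [List.getElem?_drop, List.length_cons, List.length_nil] at e1
      rw [show i - 2 + 1 = i - 1 by omega] at e1
      simpa [List.getElem?_take, show i - 1 < i by omega] using e1
  · rintro ⟨hlen, ha, hb⟩
    have h2 : (i : Int) - 2 = ((i - 2 : Nat) : Int) := by omega
    have h1 : (i : Int) - 1 = ((i - 1 : Nat) : Int) := by omega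
    rw [h2, PySem.List.pyGet?_natCast] at ha
    rw [h1, PySem.List.pyGet?_natCast] at hb
    rw [hlt]
    apply List.ext_getElem?
    intro j
    match j with
    | 0 =>
      obtain ⟨hj, e⟩ := List.getElem?_eq_some_iff.mp ha
      simp [show i - 2 < i by omega, hj, e]
    | 1 =>
      obtain ⟨hj, e⟩ := List.getElem?_eq_some_iff.mp hb
      simp only [List.getElem?_drop, List.length_cons, List.length_nil]
      rw [show i - 2 + 1 = i - 1 by omega]
      simp [show i - 1 < i by omega, hj, e]
    | (n+2) =>
      simp [List.getElem?_drop, List.getElem?_take]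
      omega

-- A's strip loop, started on cs.take i, accumulates one '[' per pair and lands on cs.take (bStrip cs i)
theorem aLoop_eq (cs : List Char) (i : Nat) (hi : i ≤ cs.length) (res : List Char) :
    aLoop res (cs.take i) =
      (res ++ List.replicate ((i - bStrip cs i) / 2) '[', cs.take (bStrip cs i)) := by
  induction i using Nat.strong_induction_on generalizing res with
  | _ i ih =>
    rw [aLoop]
    by_cases h : (2 ≤ i ∧ PySem.List.pyGet? cs ((i : Int) - 2) = some '['
             ∧ PySem.List.pyGet? cs ((i : Int) - 1) = some ']')
    · rw [dif_pos ((endswith_take_iff cs i hi).mpr h)]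
      rw [PySem.List.slice_to_neg_ofNat (cs.take i) 2 (by omega)]
      have hlt : (cs.take i).length = i := by simp; omega
      rw [hlt, List.take_take, show min (i - 2) i = i - 2 by omega]
      rw [ih (i - 2) (by omega) (by omega)]
      have hb : bStrip cs i = bStrip cs (i - 2) := by rw [bStrip, dif_pos h]
      have hle := bStrip_le cs (i - 2)
      have hev := bStrip_even cs (i - 2)
      rw [hb, show (i - bStrip cs (i - 2)) / 2 = (i - 2 - bStrip cs (i - 2)) / 2 + 1 by omega]
      simp [List.replicate_succ]
    · rw [dif_neg (by rw [endswith_take_iff cs i hi]; exact h)]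
      rw [show bStrip cs i = i by rw [bStrip, dif_neg h]]
      simp

-- the last piece of split(p, ".") is what B's forward pass computes
theorem go_last (fuel : Nat) (l cur : List Char) (accs : List (List Char))
    (hf : l.length ≤ fuel) :
    (PySem.Chars.splitOn.go ['.'] fuel l cur accs).getLast? = some (bSeg cur.reverse l) := by
  induction fuel generalizing l cur accs with
  | zero =>
    have : l = [] := by cases l <;> simp_all
    subst this
    simp [PySem.Chars.splitOn.go, bSeg]
  | succ fuel ih =>
    match l with
    | [] => simp [PySem.Chars.splitOn.go, bSeg]
    | c :: rest =>
      by_cases hc : c = '.'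
      · subst hc
        rw [PySem.Chars.splitOn.go]
        simp only [List.isPrefixOf, BEq.rfl, Bool.true_and, if_pos]
        rw [show List.drop ['.'].length ('.' :: rest) = rest by simp]
        rw [ih rest [] _ (by simp only [List.length_cons] at hf; omega)]
        simp [bSeg]
      · rw [PySem.Chars.splitOn.go]
        rw [if_neg (by simp [List.isPrefixOf]; intro h; exact absurd h.symm hc)]
        rw [ih rest (c :: cur) _ (by simp only [List.length_cons] at hf; omega)]
        simp [bSeg, hc]

theorem split_last (p : List Char) :
    (PySem.List.pyGet? ((PySem.Chars.split? p ['.']).getD []) (-1)).getD [] = bSeg [] p := by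
  rw [PySem.Chars.split?]
  simp only [List.isEmpty_cons, Bool.false_eq_true, if_false, Option.getD_some]
  rw [PySem.List.pyGet?_neg_one, PySem.Chars.splitOn]
  rw [go_last (p.length + 1) p [] [] (by omega)]
  simp

-- ===== VERDICT (by name: the statement is the Claim_ definition above) =====
theorem decode_param_type_spec : Claim_equal_decode_param_type := by
  intro param _
  unfold Spec_decode_param_type decode_param_type decode_param_type_alt
  set cs := param.toList with hcs
  have h0 : cs = cs.take cs.length := by simp
  rw [show aLoop [] cs = aLoop [] (cs.take cs.length) by rw [← h0]]
  rw [aLoop_eq cs cs.length (le_refl _) []]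
  have hle := bStrip_le cs cs.length
  simp only [List.nil_append]
  rw [split_last]
  rw [PySem.List.slice_to_natCast]
  rw [show ((cs.length : Int) - (bStrip cs cs.length : Int)) = ((cs.length - bStrip cs cs.length : Nat) : Int) by omega]
  rw [PySem.List.pyRepeat_singleton]
  rw [show (PySem.Int.floordiv ((cs.length - bStrip cs cs.length : Nat) : Int) 2).toNat
        = (cs.length - bStrip cs cs.length) / 2 by
      rw [PySem.Int.floordiv_eq_ediv_of_pos (by norm_num)]; omega]
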